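-- pv_equiv track=rewrite | github.com/tuckermclean/linux-live-iso-factory | scripts/check-licenses.py | _parse_alternatives
-- ===== SOURCE A (Python) =====
-- def _parse_alternatives(tokens: list, pos: int) -> tuple:
--     """
--     Recursive descent parser.  Returns (alternatives, new_pos).
--
--     alternatives: list of conjunctions (list of str).
--     Each conjunction represents one way to satisfy the expression.
--
--     For a conjunctive sequence  [A, B, C]:
--         alternatives = [["A","B","C"]]
--
--     For a disjunctive group || ( A B ):
--         Each item becomes its own alternative:
--         alternatives = [["A"], ["B"]]
--
--     For mixed  A || ( B C ) D:
--         Conjunctive prefix [A], then disjunctive group expands into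
--         [["A","B"], ["A","C"]], then append D to each:
--         [["A","B","D"], ["A","C","D"]]
--     """
--     # Start with one empty conjunction (the "current" running conjunction)
--     current_conjunctions = [[]]  # list of running conjunctions
--     completed_alternatives = []  # alternatives finished by OR operators
--
--     while pos < len(tokens):
--         tok = tokens[pos]
--
--         if tok == ")":
--             break  # end of group — caller will consume ")"
--
--         if tok == "||":
--             pos += 1  # consume "||"
--             if pos >= len(tokens) or tokens[pos] != "(":
--                 break  # malformed; stop
--             pos += 1  # consume "("
--             inner_alts, pos = _parse_alternatives(tokens, pos)
--             if pos < len(tokens) and tokens[pos] == ")":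
--                 pos += 1  # consume ")"
--
--             # Cross-product: each current conjunction × each inner alternative
--             new_conjunctions = []
--             for cur in current_conjunctions:
--                 for inner in (inner_alts if inner_alts else [[]]):
--                     new_conjunctions.append(cur + inner)
--             current_conjunctions = new_conjunctions
--
--         elif tok == "(":
--             pos += 1  # consume "("
--             inner_alts, pos = _parse_alternatives(tokens, pos)
--             if pos < len(tokens) and tokens[pos] == ")":
--                 pos += 1  # consume ")"
--             # Bare group — treat as conjunctive (flatten all inner licenses)
--             inner_flat = [lic for alt in inner_alts for lic in alt]
--             current_conjunctions = [cur + inner_flat for cur in current_conjunctions]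
--
--         elif tok == "AND":
--             # SPDX conjunctive operator — same semantics as a space; skip it
--             pos += 1
--
--         elif tok == "OR":
--             # SPDX disjunctive operator — flush current conjunctions as completed
--             # alternatives and start a fresh conjunction set
--             completed_alternatives.extend(current_conjunctions)
--             current_conjunctions = [[]]
--             pos += 1
--
--         else:
--             # Plain license identifier — conjunctive with everything so far
--             current_conjunctions = [cur + [tok] for cur in current_conjunctions]
--             pos += 1
--
--     return completed_alternatives + current_conjunctions, pos
-- ===== SOURCE B (Python) =====
-- def _parse_alternatives(tokens: list, pos: int) -> tuple:
--     """Iterative re-implementation: one loop driven by an explicit stack of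
--     parent frames instead of recursive descent."""
--     stack = []            # frames: (is_cross, parent_current, parent_completed)
--     cur, comp = [[]], []  # running conjunctions / completed alternatives
--     while True:
--         if pos < len(tokens):
--             tok = tokens[pos]
--             if tok == "||" and pos + 1 < len(tokens) and tokens[pos + 1] == "(":
--                 stack.append((True, cur, comp))   # disjunctive group
--                 cur, comp = [[]], []
--                 pos += 2
--                 continue
--             if tok == "(":
--                 stack.append((False, cur, comp))  # bare (conjunctive) group
--                 cur, comp = [[]], []
--                 pos += 1
--                 continue
--             if tok == "AND":
--                 pos += 1
--                 continue
--             if tok == "OR":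
--                 comp = comp + cur
--                 cur = [[]]
--                 pos += 1
--                 continue
--             if tok == "||":       # malformed '||' (no following '('): the '||'
--                 pos += 1          # is consumed, then the group ends
--             elif tok != ")":
--                 cur = [c + [tok] for c in cur]
--                 pos += 1
--                 continue
--             # tok was ")" (left unconsumed here) or a malformed "||": group ends
--         # group end: finalize this group's alternatives, return them to parent
--         alts = comp + cur
--         if not stack:
--             return alts, pos
--         is_cross, cur, comp = stack.pop()
--         if pos < len(tokens) and tokens[pos] == ")":
--             pos += 1              # parent consumes the ")"
--         if is_cross:
--             cur = [c + inner for c in cur for inner in (alts or [[]])]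
--         else:
--             flat = [lic for alt in alts for lic in alt]
--             cur = [c + flat for c in cur]
-- ===== Notes on version B (the rewrite author's own statement) =====
-- stated objective: alternative
-- what changed: The recursive-descent parser is replaced by a single iterative loop driven by an explicit stack of (merge-kind, parent_conjunctions, parent_completed) frames: '(' and '|| (' push a frame, ')', end-of-input and a malformed '||' pop/unwind frames, merging the finished group's alternatives into the parent by flatten or cross-product.
import Mathlib
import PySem

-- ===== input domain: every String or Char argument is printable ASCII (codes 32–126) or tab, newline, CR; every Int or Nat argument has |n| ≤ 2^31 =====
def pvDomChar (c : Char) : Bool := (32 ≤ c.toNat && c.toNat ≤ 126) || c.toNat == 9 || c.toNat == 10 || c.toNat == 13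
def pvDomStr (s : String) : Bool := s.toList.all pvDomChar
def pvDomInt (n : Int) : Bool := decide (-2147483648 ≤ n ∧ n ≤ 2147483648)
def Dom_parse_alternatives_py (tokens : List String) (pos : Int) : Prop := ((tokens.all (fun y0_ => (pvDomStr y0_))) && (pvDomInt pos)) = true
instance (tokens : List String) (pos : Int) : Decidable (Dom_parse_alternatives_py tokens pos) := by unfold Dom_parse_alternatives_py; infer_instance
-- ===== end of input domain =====

-- B replaces A's recursive-descent parser by a single iterative loop driven by an
-- explicit stack of parent frames (objective: alternative decomposition, same cost).

-- ===== PORT A =====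
-- A's recursion (a while-loop whose body calls the parser recursively) is made
-- structural with a fuel parameter; pvFuelA is proved sufficient below, so the
-- `.getD` default is never taken.

def pvFuelA (tokens : List String) (pos : Int) : Nat :=
  2 * ((tokens.length : Int) - pos).toNat + 1

def pvLoopA (tokens : List String) :
    Nat → Int → List (List String) → List (List String) → Option (List (List String) × Int)
  | 0, _, _, _ => none
  | f + 1, pos, cur, comp =>
    if pos < (tokens.length : Int) then
      match PySem.List.pyGet? tokens pos with
      | none => some (comp ++ cur, pos)
      | some tok =>
        if tok = ")" then some (comp ++ cur, pos)
        else if tok = "||" then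
          if (tokens.length : Int) ≤ pos + 1 ∨ ¬ PySem.List.pyGet? tokens (pos + 1) = some "(" then
            some (comp ++ cur, pos + 1)
          else
            match pvLoopA tokens f (pos + 2) [[]] [] with
            | none => none
            | some (innerAlts, p) =>
              let p2 := if p < (tokens.length : Int) ∧ PySem.List.pyGet? tokens p = some ")" then p + 1 else p
              let newConj := cur.foldl (fun acc c =>
                (if innerAlts = [] then [[]] else innerAlts).foldl
                  (fun acc2 inner => acc2 ++ [c ++ inner]) acc) []
              pvLoopA tokens f p2 newConj comp
        else if tok = "(" then
          match pvLoopA tokens f (pos + 1) [[]] [] with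
          | none => none
          | some (innerAlts, p) =>
            let p2 := if p < (tokens.length : Int) ∧ PySem.List.pyGet? tokens p = some ")" then p + 1 else p
            let flat := innerAlts.flatMap (fun alt => alt)
            pvLoopA tokens f p2 (cur.map (fun c => c ++ flat)) comp
        else if tok = "AND" then pvLoopA tokens f (pos + 1) cur comp
        else if tok = "OR" then pvLoopA tokens f (pos + 1) [[]] (comp ++ cur)
        else pvLoopA tokens f (pos + 1) (cur.map (fun c => c ++ [tok])) comp
    else some (comp ++ cur, pos)

def parse_alternatives_py (tokens : List String) (pos : Int) : List (List String) × Int :=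
  (pvLoopA tokens (pvFuelA tokens pos) pos [[]] []).getD ([[]], pos)

-- ===== PORT B =====
-- Source B's merge steps: cross product for a "|| ( … )" group, flatten for a bare group

def pvCross (cur alts : List (List String)) : List (List String) :=
  cur.flatMap (fun c => (if alts = [] then [[]] else alts).map (fun inner => c ++ inner))

def pvFlat (cur alts : List (List String)) : List (List String) :=
  cur.map (fun c => c ++ alts.flatMap (fun alt => alt))

def pvMerge (isCross : Bool) (cur alts : List (List String)) : List (List String) :=
  if isCross then pvCross cur alts else pvFlat cur alts

-- A's nested append-loops build exactly the cross product B computes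

-- Source B's single while-loop; the frame stack holds (is_cross, parent_cur, parent_comp).
-- Sum.inl p = "the current group ends at p" (the break handler pops one frame);
-- Sum.inr = the next loop state.  Fuel (same pvFuelA) is proved sufficient below.

def pvLoopB (tokens : List String) :
    Nat → Int → List (List String) → List (List String) →
    List (Bool × List (List String) × List (List String)) → Option (List (List String) × Int)
  | 0, _, _, _, _ => none
  | f + 1, pos, cur, comp, stack =>
    let step : Sum Int (Int × List (List String) × List (List String) ×
        List (Bool × List (List String) × List (List String))) :=
      if pos < (tokens.length : Int) then
        match PySem.List.pyGet? tokens pos with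
        | none => Sum.inl pos
        | some tok =>
          if tok = "||" then
            if pos + 1 < (tokens.length : Int) ∧ PySem.List.pyGet? tokens (pos + 1) = some "(" then
              Sum.inr (pos + 2, [[]], [], (true, cur, comp) :: stack)
            else Sum.inl (pos + 1)
          else if tok = "(" then Sum.inr (pos + 1, [[]], [], (false, cur, comp) :: stack)
          else if tok = "AND" then Sum.inr (pos + 1, cur, comp, stack)
          else if tok = "OR" then Sum.inr (pos + 1, [[]], comp ++ cur, stack)
          else if tok = ")" then Sum.inl pos
          else Sum.inr (pos + 1, cur.map (fun c => c ++ [tok]), comp, stack)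
      else Sum.inl pos
    match step with
    | Sum.inr (p, c, cm, st) => pvLoopB tokens f p c cm st
    | Sum.inl p =>
      match stack with
      | [] => some (comp ++ cur, p)
      | (k, pc, pcc) :: rest =>
        let p2 := if p < (tokens.length : Int) ∧ PySem.List.pyGet? tokens p = some ")" then p + 1 else p
        pvLoopB tokens f p2 (pvMerge k pc (comp ++ cur)) pcc rest

def parse_alternatives_py_alt (tokens : List String) (pos : Int) : List (List String) × Int :=
  (pvLoopB tokens (pvFuelA tokens pos) pos [[]] [] []).getD ([[]], pos)

-- ===== PRECONDITION & SPEC =====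
-- Pre_ excludes only the inputs on which the Python A raises IndexError: the first
-- token access happens whenever pos < len(tokens), so A (and B) raise exactly when
-- pos < -len(tokens); on every other input A returns normally and Pre_ admits it.
def Pre_parse_alternatives_py (tokens : List String) (pos : Int) : Prop :=
  -(tokens.length : Int) ≤ pos
instance (tokens : List String) (pos : Int) : Decidable (Pre_parse_alternatives_py tokens pos) := by unfold Pre_parse_alternatives_py; infer_instance

def pvWitness_parse_alternatives_py : List String × Int := (["MIT", "OR", "Apache-2.0"], 0)

def Spec_parse_alternatives_py (tokens : List String) (pos : Int) (out : List (List String) × Int) : Prop := out = parse_alternatives_py_alt tokens pos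
instance (tokens : List String) (pos : Int) (out : List (List String) × Int) : Decidable (Spec_parse_alternatives_py tokens pos out) := by unfold Spec_parse_alternatives_py; infer_instance

-- ===== CLAIM (what is proved, stated in full; the proofs are below) =====
def Claim_equal_parse_alternatives_py : Prop := ∀ (tokens : List String) (pos : Int), Dom_parse_alternatives_py tokens pos → Pre_parse_alternatives_py tokens pos → Spec_parse_alternatives_py tokens pos (parse_alternatives_py tokens pos)

-- ===== LEMMAS AND PROOFS =====

theorem pvLoopA_mono (tokens : List String) :
    ∀ (f : Nat) (pos : Int) (cur comp : List (List String)) r,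
      pvLoopA tokens f pos cur comp = some r → pvLoopA tokens (f + 1) pos cur comp = some r := by
  intro f
  induction f with
  | zero => intro pos cur comp r h; simp [pvLoopA] at h
  | succ f ih =>
    intro pos cur comp r h
    rw [pvLoopA] at h ⊢
    by_cases hp : pos < (tokens.length : Int)
    · simp only [if_pos hp] at h ⊢
      cases hg : PySem.List.pyGet? tokens pos with
      | none => rw [hg] at h; exact h
      | some tok =>
        rw [hg] at h
        by_cases h1 : tok = ")"
        · simp only [if_pos h1] at h ⊢; exact h
        · simp only [if_neg h1] at h ⊢
          by_cases h2 : tok = "||"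
          · simp only [if_pos h2] at h ⊢
            by_cases h3 : (tokens.length : Int) ≤ pos + 1 ∨ ¬ PySem.List.pyGet? tokens (pos + 1) = some "("
            · simp only [if_pos h3] at h ⊢; exact h
            · simp only [if_neg h3] at h ⊢
              cases hrec : pvLoopA tokens f (pos + 2) [[]] [] with
              | none => rw [hrec] at h; exact absurd h (by simp)
              | some q =>
                rw [hrec] at h
                rw [ih _ _ _ _ hrec]
                obtain ⟨alts, p⟩ := q
                exact ih _ _ _ _ h
          · simp only [if_neg h2] at h ⊢
            by_cases h4 : tok = "("
            · simp only [if_pos h4] at h ⊢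
              cases hrec : pvLoopA tokens f (pos + 1) [[]] [] with
              | none => rw [hrec] at h; exact absurd h (by simp)
              | some q =>
                rw [hrec] at h
                rw [ih _ _ _ _ hrec]
                obtain ⟨alts, p⟩ := q
                exact ih _ _ _ _ h
            · simp only [if_neg h4] at h ⊢
              by_cases h5 : tok = "AND"
              · simp only [if_pos h5] at h ⊢; exact ih _ _ _ _ h
              · simp only [if_neg h5] at h ⊢
                by_cases h6 : tok = "OR"
                · simp only [if_pos h6] at h ⊢; exact ih _ _ _ _ h
                · simp only [if_neg h6] at h ⊢; exact ih _ _ _ _ h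
    · simp only [if_neg hp] at h ⊢; exact h

theorem pvLoopA_mono_le (tokens : List String) {f f' : Nat} (hle : f ≤ f')
    (pos : Int) (cur comp : List (List String)) (r : List (List String) × Int)
    (h : pvLoopA tokens f pos cur comp = some r) : pvLoopA tokens f' pos cur comp = some r := by
  induction f' with
  | zero =>
    have : f = 0 := by omega
    subst this; exact h
  | succ f' ih =>
    rcases Nat.lt_or_ge f (f' + 1) with h1 | h1
    · exact pvLoopA_mono tokens f' pos cur comp r (ih (by omega))
    · have : f = f' + 1 := by omega
      subst this; exact h

theorem pvLoopA_suff (tokens : List String) :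
    ∀ (f : Nat) (pos : Int) (cur comp : List (List String)),
      pvFuelA tokens pos ≤ f →
      ∃ alts p, pvLoopA tokens f pos cur comp = some (alts, p) ∧ pos ≤ p := by
  intro f
  induction f with
  | zero => intro pos cur comp hf; exfalso; unfold pvFuelA at hf; omega
  | succ f ih =>
    intro pos cur comp hf
    unfold pvFuelA at hf
    rw [pvLoopA]
    by_cases hp : pos < (tokens.length : Int)
    · simp only [if_pos hp]
      cases hg : PySem.List.pyGet? tokens pos with
      | none => exact ⟨comp ++ cur, pos, rfl, le_rfl⟩
      | some tok =>
        by_cases h1 : tok = ")"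
        · simp only [if_pos h1]; exact ⟨comp ++ cur, pos, rfl, le_rfl⟩
        · simp only [if_neg h1]
          by_cases h2 : tok = "||"
          · simp only [if_pos h2]
            by_cases h3 : (tokens.length : Int) ≤ pos + 1 ∨ ¬ PySem.List.pyGet? tokens (pos + 1) = some "("
            · simp only [if_pos h3]; exact ⟨comp ++ cur, pos + 1, rfl, by omega⟩
            · simp only [if_neg h3]
              have h3a : pos + 1 < (tokens.length : Int) := by
                by_contra hc
                exact h3 (Or.inl (by omega))
              obtain ⟨a1, p1, hrec, hp1⟩ := ih (pos + 2) [[]] [] (by unfold pvFuelA; omega)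
              rw [hrec]
              set q := (if p1 < (tokens.length : Int) ∧ PySem.List.pyGet? tokens p1 = some ")" then p1 + 1 else p1) with hq
              have hp2 : pos + 2 ≤ q := by rw [hq]; split <;> omega
              obtain ⟨a2, p2, hrec2, hle2⟩ := ih q
                (cur.foldl (fun acc c =>
                  (if a1 = [] then [[]] else a1).foldl
                    (fun acc2 inner => acc2 ++ [c ++ inner]) acc) [])
                comp (by unfold pvFuelA; omega)
              exact ⟨a2, p2, hrec2, by omega⟩
          · simp only [if_neg h2]
            by_cases h4 : tok = "("
            · simp only [if_pos h4]
              obtain ⟨a1, p1, hrec, hp1⟩ := ih (pos + 1) [[]] [] (by unfold pvFuelA; omega)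
              rw [hrec]
              set q := (if p1 < (tokens.length : Int) ∧ PySem.List.pyGet? tokens p1 = some ")" then p1 + 1 else p1) with hq
              have hp2 : pos + 1 ≤ q := by rw [hq]; split <;> omega
              obtain ⟨a2, p2, hrec2, hle2⟩ := ih q
                (cur.map (fun c => c ++ a1.flatMap (fun alt => alt)))
                comp (by unfold pvFuelA; omega)
              exact ⟨a2, p2, hrec2, by omega⟩
            · simp only [if_neg h4]
              by_cases h5 : tok = "AND"
              · simp only [if_pos h5]
                obtain ⟨a1, p1, hrec, hp1⟩ := ih (pos + 1) cur comp (by unfold pvFuelA; omega)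
                exact ⟨a1, p1, hrec, by omega⟩
              · simp only [if_neg h5]
                by_cases h6 : tok = "OR"
                · simp only [if_pos h6]
                  obtain ⟨a1, p1, hrec, hp1⟩ := ih (pos + 1) [[]] (comp ++ cur) (by unfold pvFuelA; omega)
                  exact ⟨a1, p1, hrec, by omega⟩
                · simp only [if_neg h6]
                  obtain ⟨a1, p1, hrec, hp1⟩ := ih (pos + 1) (cur.map (fun c => c ++ [tok])) comp (by unfold pvFuelA; omega)
                  exact ⟨a1, p1, hrec, by omega⟩
    · simp only [if_neg hp]; exact ⟨comp ++ cur, pos, rfl, le_rfl⟩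

-- canonical (fuel-independent) value of A's loop, used by the simulation proof
def pvLoopA' (tokens : List String) (pos : Int) (cur comp : List (List String)) :
    List (List String) × Int :=
  (pvLoopA tokens (pvFuelA tokens pos) pos cur comp).getD ([[]], pos)


theorem pvLoopA_eq (tokens : List String) {f : Nat} {pos : Int} (cur comp : List (List String))
    (hf : pvFuelA tokens pos ≤ f) :
    pvLoopA tokens f pos cur comp = some (pvLoopA' tokens pos cur comp) := by
  obtain ⟨a, p, h, -⟩ := pvLoopA_suff tokens (pvFuelA tokens pos) pos cur comp le_rfl
  have h2 := pvLoopA_mono_le tokens hf pos cur comp (a, p) h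
  rw [h2, pvLoopA', h]
  rfl

theorem pvLoopA'_le (tokens : List String) (pos : Int) (cur comp : List (List String)) :
    pos ≤ (pvLoopA' tokens pos cur comp).2 := by
  obtain ⟨a, p, h, hle⟩ := pvLoopA_suff tokens (pvFuelA tokens pos) pos cur comp le_rfl
  rw [pvLoopA', h]
  exact hle

-- branch characterisations of pvLoopA' (one step of A's loop body)

theorem pvLA_halt (tokens : List String) (pos : Int) (cur comp : List (List String))
    (hp : ¬ pos < (tokens.length : Int)) :
    pvLoopA' tokens pos cur comp = (comp ++ cur, pos) := by
  rw [pvLoopA', pvFuelA, pvLoopA]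
  simp only [if_neg hp, Option.getD_some]

theorem pvLA_none (tokens : List String) (pos : Int) (cur comp : List (List String))
    (hp : pos < (tokens.length : Int)) (hg : PySem.List.pyGet? tokens pos = none) :
    pvLoopA' tokens pos cur comp = (comp ++ cur, pos) := by
  rw [pvLoopA', pvFuelA, pvLoopA]
  simp only [if_pos hp, hg, Option.getD_some]

theorem pvLA_rpar (tokens : List String) (pos : Int) (cur comp : List (List String))
    (hp : pos < (tokens.length : Int)) (hg : PySem.List.pyGet? tokens pos = some ")") :
    pvLoopA' tokens pos cur comp = (comp ++ cur, pos) := by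
  rw [pvLoopA', pvFuelA, pvLoopA]
  simp [hp, hg]

theorem pvLA_bad (tokens : List String) (pos : Int) (cur comp : List (List String))
    (hp : pos < (tokens.length : Int)) (hg : PySem.List.pyGet? tokens pos = some "||")
    (hm : ¬ (pos + 1 < (tokens.length : Int) ∧ PySem.List.pyGet? tokens (pos + 1) = some "(")) :
    pvLoopA' tokens pos cur comp = (comp ++ cur, pos + 1) := by
  rw [pvLoopA', pvFuelA, pvLoopA]
  have hm' : (tokens.length : Int) ≤ pos + 1 ∨ ¬ PySem.List.pyGet? tokens (pos + 1) = some "(" := by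
    by_cases hc : pos + 1 < (tokens.length : Int)
    · right; intro hc2; exact hm ⟨hc, hc2⟩
    · left; omega
  simp [hp, hg, hm']

theorem pvCross_foldl (cur alts : List (List String)) :
    cur.foldl (fun acc c =>
      (if alts = [] then [[]] else alts).foldl
        (fun acc2 inner => acc2 ++ [c ++ inner]) acc) [] = pvCross cur alts := by
  simp only [PySem.List.foldl_append_singleton_eq_map]
  rw [PySem.List.foldl_append_eq_flatMap]
  simp [pvCross]

theorem pvLA_grp (tokens : List String) (pos : Int) (cur comp : List (List String))
    (hp : pos < (tokens.length : Int)) (hg : PySem.List.pyGet? tokens pos = some "(") :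
    pvLoopA' tokens pos cur comp =
      pvLoopA' tokens
        (if (pvLoopA' tokens (pos + 1) [[]] []).2 < (tokens.length : Int) ∧
            PySem.List.pyGet? tokens (pvLoopA' tokens (pos + 1) [[]] []).2 = some ")" then
          (pvLoopA' tokens (pos + 1) [[]] []).2 + 1 else (pvLoopA' tokens (pos + 1) [[]] []).2)
        (pvFlat cur (pvLoopA' tokens (pos + 1) [[]] []).1) comp := by
  have hle := pvLoopA'_le tokens (pos + 1) [[]] []
  conv_lhs => rw [pvLoopA', pvFuelA, pvLoopA]
  simp only [if_pos hp, hg]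
  simp only [String.reduceEq, reduceIte]
  rw [pvLoopA_eq tokens ([[]]) ([]) (f := 2 * ((tokens.length : Int) - pos).toNat)
    (by unfold pvFuelA; omega)]
  generalize hq : pvLoopA' tokens (pos + 1) [[]] [] = r at *
  obtain ⟨alts, p⟩ := r
  dsimp only
  set q := (if p < (tokens.length : Int) ∧ PySem.List.pyGet? tokens p = some ")" then p + 1 else p) with hqd
  have hq2 : pos + 1 ≤ q := by rw [hqd]; dsimp only at hle; split <;> omega
  rw [pvLoopA_eq tokens _ comp (f := 2 * ((tokens.length : Int) - pos).toNat)
    (by unfold pvFuelA; omega)]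
  simp [pvFlat]

theorem pvLA_dis (tokens : List String) (pos : Int) (cur comp : List (List String))
    (hp : pos < (tokens.length : Int)) (hg : PySem.List.pyGet? tokens pos = some "||")
    (hw : pos + 1 < (tokens.length : Int) ∧ PySem.List.pyGet? tokens (pos + 1) = some "(") :
    pvLoopA' tokens pos cur comp =
      pvLoopA' tokens
        (if (pvLoopA' tokens (pos + 2) [[]] []).2 < (tokens.length : Int) ∧
            PySem.List.pyGet? tokens (pvLoopA' tokens (pos + 2) [[]] []).2 = some ")" then
          (pvLoopA' tokens (pos + 2) [[]] []).2 + 1 else (pvLoopA' tokens (pos + 2) [[]] []).2)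
        (pvCross cur (pvLoopA' tokens (pos + 2) [[]] []).1) comp := by
  have hle := pvLoopA'_le tokens (pos + 2) [[]] []
  have hm' : ¬ ((tokens.length : Int) ≤ pos + 1 ∨ ¬ PySem.List.pyGet? tokens (pos + 1) = some "(") := by
    intro hc
    rcases hc with hc | hc
    · omega
    · exact hc hw.2
  conv_lhs => rw [pvLoopA', pvFuelA, pvLoopA]
  simp only [if_pos hp, hg]
  simp only [String.reduceEq, reduceIte, if_neg hm']
  rw [pvLoopA_eq tokens ([[]]) ([]) (f := 2 * ((tokens.length : Int) - pos).toNat)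
    (by unfold pvFuelA; omega)]
  generalize hq : pvLoopA' tokens (pos + 2) [[]] [] = r at *
  obtain ⟨alts, p⟩ := r
  dsimp only
  set q := (if p < (tokens.length : Int) ∧ PySem.List.pyGet? tokens p = some ")" then p + 1 else p) with hqd
  have hq2 : pos + 2 ≤ q := by rw [hqd]; dsimp only at hle; split <;> omega
  rw [pvLoopA_eq tokens _ comp (f := 2 * ((tokens.length : Int) - pos).toNat)
    (by unfold pvFuelA; omega)]
  rw [pvCross_foldl]
  simp

theorem pvLA_and (tokens : List String) (pos : Int) (cur comp : List (List String))
    (hp : pos < (tokens.length : Int)) (hg : PySem.List.pyGet? tokens pos = some "AND") :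
    pvLoopA' tokens pos cur comp = pvLoopA' tokens (pos + 1) cur comp := by
  conv_lhs => rw [pvLoopA', pvFuelA, pvLoopA]
  simp only [if_pos hp, hg]
  simp only [String.reduceEq, reduceIte]
  rw [pvLoopA_eq tokens cur comp (f := 2 * ((tokens.length : Int) - pos).toNat)
    (by unfold pvFuelA; omega)]
  rfl

theorem pvLA_or (tokens : List String) (pos : Int) (cur comp : List (List String))
    (hp : pos < (tokens.length : Int)) (hg : PySem.List.pyGet? tokens pos = some "OR") :
    pvLoopA' tokens pos cur comp = pvLoopA' tokens (pos + 1) [[]] (comp ++ cur) := by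
  conv_lhs => rw [pvLoopA', pvFuelA, pvLoopA]
  simp only [if_pos hp, hg]
  simp only [String.reduceEq, reduceIte]
  rw [pvLoopA_eq tokens ([[]]) (comp ++ cur) (f := 2 * ((tokens.length : Int) - pos).toNat)
    (by unfold pvFuelA; omega)]
  rfl

theorem pvLA_id (tokens : List String) (pos : Int) (cur comp : List (List String)) (tok : String)
    (hp : pos < (tokens.length : Int)) (hg : PySem.List.pyGet? tokens pos = some tok)
    (h1 : ¬ tok = ")") (h2 : ¬ tok = "||") (h4 : ¬ tok = "(") (h5 : ¬ tok = "AND")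
    (h6 : ¬ tok = "OR") :
    pvLoopA' tokens pos cur comp = pvLoopA' tokens (pos + 1) (cur.map (fun c => c ++ [tok])) comp := by
  conv_lhs => rw [pvLoopA', pvFuelA, pvLoopA]
  simp only [if_pos hp, hg, if_neg h1, if_neg h2, if_neg h4, if_neg h5, if_neg h6]
  rw [pvLoopA_eq tokens (cur.map (fun c => c ++ [tok])) comp (f := 2 * ((tokens.length : Int) - pos).toNat)
    (by unfold pvFuelA; omega)]
  rfl

-- A's run resumed through a stack of pending parent frames; B's loop computes it

def pvRunA (tokens : List String) :
    List (Bool × List (List String) × List (List String)) → Int →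
    List (List String) → List (List String) → List (List String) × Int
  | [], pos, cur, comp => pvLoopA' tokens pos cur comp
  | (k, pc, pcc) :: rest, pos, cur, comp =>
    let r := pvLoopA' tokens pos cur comp
    let p2 := if r.2 < (tokens.length : Int) ∧ PySem.List.pyGet? tokens r.2 = some ")" then r.2 + 1 else r.2
    pvRunA tokens rest p2 (pvMerge k pc r.1) pcc

theorem pvRunA_congr (tokens : List String)
    (stack : List (Bool × List (List String) × List (List String)))
    {pos pos' : Int} {cur comp cur' comp' : List (List String)}
    (h : pvLoopA' tokens pos cur comp = pvLoopA' tokens pos' cur' comp') :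
    pvRunA tokens stack pos cur comp = pvRunA tokens stack pos' cur' comp' := by
  cases stack with
  | nil => simpa [pvRunA] using h
  | cons fr rest => obtain ⟨k, pc, pcc⟩ := fr; simp only [pvRunA, h]

theorem pvSim (tokens : List String) :
    ∀ (f : Nat) (pos : Int) (cur comp : List (List String))
      (stack : List (Bool × List (List String) × List (List String))) r,
      pvLoopB tokens f pos cur comp stack = some r →
      pvRunA tokens stack pos cur comp = r := by
  intro f
  induction f with
  | zero => intro pos cur comp stack r h; simp [pvLoopB] at h
  | succ f ih =>
    intro pos cur comp stack r h
    rw [pvLoopB] at h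
    by_cases hp : pos < (tokens.length : Int)
    · simp only [if_pos hp] at h
      cases hg : PySem.List.pyGet? tokens pos with
      | none =>
        rw [hg] at h
        -- break at pos; pvLoopA' stops with (comp ++ cur, pos)
        have hA := pvLA_none tokens pos cur comp hp hg
        cases stack with
        | nil =>
          simp only at h
          rw [pvRunA, hA]
          exact (Option.some.injEq _ _ ▸ h)
        | cons fr rest =>
          obtain ⟨k, pc, pcc⟩ := fr
          simp only at h
          rw [pvRunA]
          rw [hA]
          exact ih _ _ _ _ _ h
      | some tok =>
        rw [hg] at h
        by_cases h2 : tok = "||"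
        · subst h2
          simp only [String.reduceEq, reduceIte] at h
          by_cases hw : pos + 1 < (tokens.length : Int) ∧ PySem.List.pyGet? tokens (pos + 1) = some "("
          · simp only [if_pos hw] at h
            have hA := pvLA_dis tokens pos cur comp hp hg hw
            have := ih _ _ _ _ _ h
            -- this : pvRunA ((true,cur,comp) :: stack) (pos+2) [[]] [] = r
            rw [pvRunA] at this
            rw [pvRunA_congr tokens stack hA]
            simpa [pvMerge] using this
          · simp only [if_neg hw] at h
            have hA := pvLA_bad tokens pos cur comp hp hg hw
            cases stack with
            | nil =>
              simp only at h
              rw [pvRunA, hA]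
              exact (Option.some.injEq _ _ ▸ h)
            | cons fr rest =>
              obtain ⟨k, pc, pcc⟩ := fr
              simp only at h
              rw [pvRunA, hA]
              exact ih _ _ _ _ _ h
        · simp only [if_neg h2] at h
          by_cases h4 : tok = "("
          · subst h4
            simp only [String.reduceEq, reduceIte] at h
            have hA := pvLA_grp tokens pos cur comp hp hg
            have := ih _ _ _ _ _ h
            rw [pvRunA] at this
            rw [pvRunA_congr tokens stack hA]
            simpa [pvMerge] using this
          · simp only [if_neg h4] at h
            by_cases h5 : tok = "AND"
            · subst h5
              simp only [String.reduceEq, reduceIte] at h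
              rw [pvRunA_congr tokens stack (pvLA_and tokens pos cur comp hp hg)]
              exact ih _ _ _ _ _ h
            · simp only [if_neg h5] at h
              by_cases h6 : tok = "OR"
              · subst h6
                simp only [String.reduceEq, reduceIte] at h
                rw [pvRunA_congr tokens stack (pvLA_or tokens pos cur comp hp hg)]
                exact ih _ _ _ _ _ h
              · simp only [if_neg h6] at h
                by_cases h1 : tok = ")"
                · subst h1
                  simp only [reduceIte] at h
                  have hA := pvLA_rpar tokens pos cur comp hp hg
                  cases stack with
                  | nil =>
                    simp only at h
                    rw [pvRunA, hA]
                    exact (Option.some.injEq _ _ ▸ h)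
                  | cons fr rest =>
                    obtain ⟨k, pc, pcc⟩ := fr
                    simp only at h
                    rw [pvRunA, hA]
                    exact ih _ _ _ _ _ h
                · simp only [if_neg h1] at h
                  rw [pvRunA_congr tokens stack (pvLA_id tokens pos cur comp tok hp hg h1 h2 h4 h5 h6)]
                  exact ih _ _ _ _ _ h
    · simp only [if_neg hp] at h
      have hA := pvLA_halt tokens pos cur comp hp
      cases stack with
      | nil =>
        simp only at h
        rw [pvRunA, hA]
        exact (Option.some.injEq _ _ ▸ h)
      | cons fr rest =>
        obtain ⟨k, pc, pcc⟩ := fr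
        simp only at h
        rw [pvRunA, hA]
        exact ih _ _ _ _ _ h

theorem pvLoopB_suff (tokens : List String) :
    ∀ (f : Nat) (pos : Int) (cur comp : List (List String))
      (stack : List (Bool × List (List String) × List (List String))),
      2 * ((tokens.length : Int) - pos).toNat + stack.length + 1 ≤ f →
      ∃ r, pvLoopB tokens f pos cur comp stack = some r := by
  intro f
  induction f with
  | zero => intro pos cur comp stack hf; exfalso; omega
  | succ f ih =>
    intro pos cur comp stack hf
    rw [pvLoopB]
    by_cases hp : pos < (tokens.length : Int)
    · simp only [if_pos hp]
      cases hg : PySem.List.pyGet? tokens pos with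
      | none =>
        cases stack with
        | nil => exact ⟨_, rfl⟩
        | cons fr rest =>
          obtain ⟨k, pc, pcc⟩ := fr
          simp only
          have hc : ¬ (pos < (tokens.length : Int) ∧ PySem.List.pyGet? tokens pos = some ")") := by
            simp [hg]
          rw [if_neg hc]
          exact ih pos _ _ rest (by simp at hf ⊢; omega)
      | some tok =>
        by_cases h2 : tok = "||"
        · subst h2
          simp only [String.reduceEq, reduceIte]
          by_cases hw : pos + 1 < (tokens.length : Int) ∧ PySem.List.pyGet? tokens (pos + 1) = some "("
          · rw [if_pos hw]
            exact ih (pos + 2) _ _ _ (by simp at hf ⊢; omega)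
          · rw [if_neg hw]
            cases stack with
            | nil => exact ⟨_, rfl⟩
            | cons fr rest =>
              obtain ⟨k, pc, pcc⟩ := fr
              simp only
              set q := (if pos + 1 < (tokens.length : Int) ∧ PySem.List.pyGet? tokens (pos + 1) = some ")" then pos + 1 + 1 else pos + 1) with hq
              have hq2 : pos ≤ q := by rw [hq]; split <;> omega
              exact ih q _ _ rest (by simp at hf ⊢; omega)
        · simp only [if_neg h2]
          by_cases h4 : tok = "("
          · subst h4
            simp only [String.reduceEq, reduceIte]
            exact ih (pos + 1) _ _ _ (by simp at hf ⊢; omega)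
          · simp only [if_neg h4]
            by_cases h5 : tok = "AND"
            · subst h5
              simp only [String.reduceEq, reduceIte]
              exact ih (pos + 1) _ _ _ (by simp at hf ⊢; omega)
            · simp only [if_neg h5]
              by_cases h6 : tok = "OR"
              · subst h6
                simp only [String.reduceEq, reduceIte]
                exact ih (pos + 1) _ _ _ (by simp at hf ⊢; omega)
              · simp only [if_neg h6]
                by_cases h1 : tok = ")"
                · subst h1
                  simp only [reduceIte]
                  cases stack with
                  | nil => exact ⟨_, rfl⟩
                  | cons fr rest =>
                    obtain ⟨k, pc, pcc⟩ := fr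
                    simp only
                    set q := (if pos < (tokens.length : Int) ∧ PySem.List.pyGet? tokens pos = some ")" then pos + 1 else pos) with hq
                    have hq2 : pos ≤ q := by rw [hq]; split <;> omega
                    exact ih q _ _ rest (by simp at hf ⊢; omega)
                · simp only [if_neg h1]
                  exact ih (pos + 1) _ _ _ (by simp at hf ⊢; omega)
    · simp only [if_neg hp]
      cases stack with
      | nil => exact ⟨_, rfl⟩
      | cons fr rest =>
        obtain ⟨k, pc, pcc⟩ := fr
        simp only
        have hc : ¬ (pos < (tokens.length : Int) ∧ PySem.List.pyGet? tokens pos = some ")") := by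
          intro hc; exact hp hc.1
        rw [if_neg hc]
        exact ih pos _ _ rest (by simp at hf ⊢; omega)

theorem final_eq (tokens : List String) (pos : Int) :
    (pvLoopA tokens (pvFuelA tokens pos) pos [[]] []).getD ([[]], pos) =
    (pvLoopB tokens (pvFuelA tokens pos) pos [[]] [] []).getD ([[]], pos) := by
  obtain ⟨r, hr⟩ := pvLoopB_suff tokens (pvFuelA tokens pos) pos [[]] [] [] (by unfold pvFuelA; simp only [List.length_nil]; omega)
  have hsim := pvSim tokens (pvFuelA tokens pos) pos [[]] [] [] r hr
  rw [hr, pvLoopA_eq tokens ([[]]) ([]) le_rfl]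
  rw [pvRunA] at hsim
  rw [hsim]


-- ===== VERDICT (by name: the statement is the Claim_ definition above) =====
theorem parse_alternatives_py_spec : Claim_equal_parse_alternatives_py := by
  intro tokens pos _ _
  unfold Spec_parse_alternatives_py parse_alternatives_py parse_alternatives_py_alt
  exact final_eq tokens pos
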